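-- pv_equiv track=rewrite | github.com/biniyamtesfaye/A2SV | A2SV Remote Contest #7 17-Mar-2025/D - The Snap of Fury 309601.py | count_survivors
-- ===== SOURCE A (Python) =====
-- def count_survivors(n, L):
--     killed = [0] * (n + 1)
--
--     for i in range(n):
--         left = max(0, i - L[i])
--         right = i - 1
--         killed[left] += 1
--         killed[right + 1] -= 1
--
--     survivors = 0
--     current = 0
--     for i in range(n):
--         current += killed[i]
--         if current == 0:
--             survivors += 1
--
--     return survivors
-- ===== SOURCE B (Python) =====
-- def count_survivors(n, L):
--     # Right-to-left pass: position j survives iff the running suffix minimum of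
--     # i - L[i] over i > j stays strictly above j (empty suffix -> survives).
--     survivors = 0
--     m = None  # min of i - L[i] over indices already processed (all i > j)
--     for j in range(n - 1, -1, -1):
--         if m is None or j < m:
--             survivors += 1
--         v = j - L[j]
--         if m is None or v < m:
--             m = v
--     return survivors
-- ===== Notes on version B (the rewrite author's own statement) =====
-- stated objective: alternative
-- what changed: Replaces A's difference array plus prefix-sum scan (two passes and an auxiliary n+1 array) by a single right-to-left pass that keeps a running suffix minimum of i - L[i] and counts position j as a survivor exactly when that minimum stays above j, using O(1) extra space.
-- outside the precondition, e.g. on count_survivors(2, [0, -1]): A returns 1, B returns 2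
import Mathlib
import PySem

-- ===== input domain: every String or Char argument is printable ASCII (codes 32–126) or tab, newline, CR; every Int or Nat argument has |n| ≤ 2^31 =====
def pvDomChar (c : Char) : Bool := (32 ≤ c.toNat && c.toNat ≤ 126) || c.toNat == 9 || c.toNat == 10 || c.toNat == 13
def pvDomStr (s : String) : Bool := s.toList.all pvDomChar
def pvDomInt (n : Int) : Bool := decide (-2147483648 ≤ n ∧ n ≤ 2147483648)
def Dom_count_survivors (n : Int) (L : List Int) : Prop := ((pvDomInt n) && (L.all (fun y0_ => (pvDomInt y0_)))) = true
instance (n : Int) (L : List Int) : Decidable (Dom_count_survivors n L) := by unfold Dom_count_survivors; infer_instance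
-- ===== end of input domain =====

-- B replaces A's difference array + prefix-sum scan by a single right-to-left pass
-- keeping a running suffix minimum of i - L[i] (objective: alternative decomposition).

-- ===== PORT A =====
def count_survivors (n : Int) (L : List Int) : Int :=
  let killed0 : List Int := List.replicate (n + 1).toNat 0
  let killed :=
    (PySem.List.pyRange 0 n 1).foldl
      (fun killed i =>
        let left := max 0 (i - PySem.List.pyGetD L i 0)
        let right := i - 1
        let killed := PySem.List.pySetD killed left (PySem.List.pyGetD killed left 0 + 1)
        PySem.List.pySetD killed (right + 1) (PySem.List.pyGetD killed (right + 1) 0 - 1))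
      killed0
  let sc :=
    (PySem.List.pyRange 0 n 1).foldl
      (fun (sc : Int × Int) i =>
        let current := sc.2 + PySem.List.pyGetD killed i 0
        (if current = 0 then sc.1 + 1 else sc.1, current))
      (0, 0)
  sc.1

-- ===== PORT B =====
def count_survivors_alt (n : Int) (L : List Int) : Int :=
  ((PySem.List.pyRange (n - 1) (-1) (-1)).foldl
      (fun (st : Int × Option Int) j =>
        let survivors :=
          match st.2 with
          | none => st.1 + 1
          | some m => if j < m then st.1 + 1 else st.1
        let v := j - PySem.List.pyGetD L j 0
        let m' :=
          match st.2 with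
          | none => some v
          | some m => if v < m then some v else some m
        (survivors, m'))
      (0, none)).1

-- ===== PRECONDITION & SPEC =====
-- Pre_ excludes inputs where A raises an IndexError (n > len(L), or a negative
-- kill range with i - L[i] > n) and the remaining inputs with a negative kill
-- range L[i] < 0, which are outside the natural domain of the problem: there A's
-- difference-array encoding produces accidental negative counts.
def Pre_count_survivors (n : Int) (L : List Int) : Prop :=
  n ≤ (L.length : Int) ∧ ∀ x ∈ L.take n.toNat, 0 ≤ x
instance (n : Int) (L : List Int) : Decidable (Pre_count_survivors n L) := by
  unfold Pre_count_survivors; infer_instance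
def pvWitness_count_survivors : Int × List Int := (3, [0, 2, 1])
def Spec_count_survivors (n : Int) (L : List Int) (out : Int) : Prop := out = count_survivors_alt n L
instance (n : Int) (L : List Int) (out : Int) : Decidable (Spec_count_survivors n L out) := by unfold Spec_count_survivors; infer_instance

-- ===== CLAIM (what is proved, stated in full; the proofs are below) =====
def Claim_equal_count_survivors : Prop := ∀ (n : Int) (L : List Int), Dom_count_survivors n L → Pre_count_survivors n L → Spec_count_survivors n L (count_survivors n L)

-- ===== LEMMAS AND PROOFS =====

-- i - L[i] (Nat index, default 0)
def fA (L : List Int) (i : Nat) : Int := (i : Int) - L.getD i 0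
-- left endpoint max(0, i - L[i])
def lA (L : List Int) (i : Nat) : Int := max 0 ((i : Int) - L.getD i 0)
-- "position j survives": no i with j < i < N kills it
def survB (L : List Int) (N j : Nat) : Bool :=
  (List.range N).all (fun i => decide (j < i → (j : Int) < fA L i))
-- survivor count among positions [0, K)
def countSurv (L : List Int) (N K : Nat) : Int :=
  ((List.range K).countP (fun j => survB L N j) : Int)

theorem countSurv_succ (L : List Int) (N K : Nat) :
    countSurv L N (K + 1) = countSurv L N K + (if survB L N K then 1 else 0) := by
  simp only [countSurv, List.range_succ, List.countP_append, List.countP_cons]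
  split <;> simp

-- ---- B side ----

theorem range_reverse_cast (n : Int) (h : 0 ≤ n) :
    PySem.List.pyRange (n - 1) (-1) (-1)
      = (List.range n.toNat).reverse.map (fun j : Nat => (j : Int)) := by
  rw [PySem.List.pyRange_neg_one]
  apply List.ext_getElem
  · simp
  · intro k h1 h2
    simp only [List.getElem_map, List.getElem_range, List.getElem_reverse, List.length_range]
    simp only [List.length_map, List.length_range] at h1
    have hk : k < n.toNat := by omega
    have : ((n.toNat - 1 - k : Nat) : Int) = n - 1 - (k : Int) := by omega
    rw [this]

theorem B_loop (L : List Int) (N : Nat) :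
    ∀ (K : Nat), K ≤ N → ∀ (cnt : Int) (mo : Option Int),
    (∀ x : Int, (match mo with | none => True | some m => x < m)
        ↔ ∀ i : Nat, K ≤ i → i < N → x < fA L i) →
    (((List.range K).reverse.map (fun j : Nat => (j : Int))).foldl
      (fun (st : Int × Option Int) j =>
        let survivors :=
          match st.2 with
          | none => st.1 + 1
          | some m => if j < m then st.1 + 1 else st.1
        let v := j - PySem.List.pyGetD L j 0
        let m' :=
          match st.2 with
          | none => some v
          | some m => if v < m then some v else some m
        (survivors, m'))
      (cnt, mo)).1 = cnt + countSurv L N K := by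
  intro K
  induction K with
  | zero => intro _ cnt mo _; simp [countSurv]
  | succ K ih =>
    intro hK cnt mo hmo
    have hKN : K < N := hK
    rw [List.range_succ, List.reverse_append]
    simp only [List.reverse_cons, List.reverse_nil, List.nil_append, List.singleton_append,
      List.map_cons, List.foldl_cons]
    have hv : (K : Int) - PySem.List.pyGetD L (K : Int) 0 = fA L K := by
      simp [fA]
    have hsurv_iff : survB L N K = true ↔ (∀ i : Nat, K < i → i < N → (K : Int) < fA L i) := by
      simp only [survB, List.all_eq_true, List.mem_range, decide_eq_true_eq]
      constructor
      · intro h i h1 h2; exact h i h2 h1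
      · intro h i h1 h2; exact h i h2 h1
    rcases mo with _ | m
    · -- running minimum not yet set: j = K survives, minimum becomes fA L K
      have htail : ∀ i : Nat, K + 1 ≤ i → i < N → ∀ x : Int, x < fA L i := by
        intro i h1 h2 x; exact (hmo x).mp trivial i h1 h2
      have hs : survB L N K = true := by
        rw [hsurv_iff]; intro i h1 h2; exact htail i h1 h2 _
      rw [hv, ih (by omega) (cnt + 1) (some (fA L K)) (by
        intro x
        constructor
        · intro hx i h1 h2
          rcases Nat.eq_or_lt_of_le h1 with h | h
          · exact h ▸ hx
          · exact htail i h h2 x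
        · intro h; exact h K (le_refl K) hKN)]
      rw [countSurv_succ, hs]; simp; ring
    · -- running minimum is m = min of fA over (K, N)
      have hm := hmo
      simp only at hm
      rw [hv]
      have hs_iff : survB L N K = true ↔ (K : Int) < m := by
        rw [hsurv_iff]
        constructor
        · intro h; exact (hm (K : Int)).mpr (fun i h1 h2 => h i (by omega) h2)
        · intro h i h1 h2; exact (hm (K : Int)).mp h i (by omega) h2
      have hchar : ∀ (m' : Int), (∀ x : Int, x < m' ↔ (x < fA L K ∧ x < m)) →
          (∀ x : Int, x < m' ↔ ∀ i : Nat, K ≤ i → i < N → x < fA L i) := by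
        intro m' hmm x
        rw [hmm]
        constructor
        · rintro ⟨h1, h2⟩ i hKi hiN
          rcases Nat.eq_or_lt_of_le hKi with h | h
          · exact h ▸ h1
          · exact (hm x).mp h2 i h hiN
        · intro h
          exact ⟨h K (le_refl K) hKN, (hm x).mpr (fun i h1 h2 => h i (by omega) h2)⟩
      by_cases hKm : (K : Int) < m
      · simp only [if_pos hKm]
        by_cases hfm : fA L K < m
        · rw [if_pos hfm, ih (by omega) (cnt + 1) (some (fA L K))
            (hchar (fA L K) (fun x => by omega))]
          rw [countSurv_succ, hs_iff.mpr hKm]; simp; ring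
        · rw [if_neg hfm, ih (by omega) (cnt + 1) (some m)
            (hchar m (fun x => by omega))]
          rw [countSurv_succ, hs_iff.mpr hKm]; simp; ring
      · simp only [if_neg hKm]
        have hs : survB L N K = false := by
          rw [← Bool.not_eq_true, hs_iff]; exact hKm
        by_cases hfm : fA L K < m
        · rw [if_pos hfm, ih (by omega) cnt (some (fA L K))
            (hchar (fA L K) (fun x => by omega))]
          rw [countSurv_succ, hs]; simp
        · rw [if_neg hfm, ih (by omega) cnt (some m)
            (hchar m (fun x => by omega))]
          rw [countSurv_succ, hs]; simp

theorem B_eq (n : Int) (L : List Int) (h : 0 ≤ n) :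
    count_survivors_alt n L = countSurv L n.toNat n.toNat := by
  unfold count_survivors_alt
  rw [range_reverse_cast n h]
  rw [B_loop L n.toNat n.toNat (le_refl _) 0 none
      (fun x => ⟨fun _ i h1 h2 => absurd h2 (by omega), fun _ => trivial⟩)]
  simp

-- ---- A side ----

theorem getD_set_eq (xs : List Int) (m k : Nat) (v d : Int) (hm : m < xs.length) :
    (xs.set m v).getD k d = if k = m then v else xs.getD k d := by
  rcases eq_or_ne k m with h | h
  · subst h; simp [List.getD_eq_getElem?_getD, hm]
  · simp [List.getD_eq_getElem?_getD, h, Ne.symm h]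

-- net contribution of the first K difference-array updates at index k
def kweight (L : List Int) (K k : Nat) : Int :=
  ∑ i ∈ Finset.range K, ((if lA L i = (k : Int) then 1 else 0) - (if i = k then (1 : Int) else 0))

-- prefix sum of the final difference array up to (but excluding) index K
def gsum (L : List Int) (N K : Nat) : Int :=
  ∑ i ∈ Finset.range N, ((if lA L i < (K : Int) then 1 else 0) - (if (i : Int) < (K : Int) then (1 : Int) else 0))

-- survivor count among positions [0, K) as A computes it
def countA (L : List Int) (N K : Nat) : Int :=
  ((List.range K).countP (fun j => decide (gsum L N (j + 1) = 0)) : Int)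

theorem countA_succ (L : List Int) (N K : Nat) :
    countA L N (K + 1) = countA L N K + (if gsum L N (K + 1) = 0 then 1 else 0) := by
  unfold countA
  rw [List.range_succ, List.countP_append, List.countP_cons, List.countP_nil]
  split <;> simp_all

theorem gsum_succ (L : List Int) (N K : Nat) :
    gsum L N (K + 1) = gsum L N K + kweight L N K := by
  unfold gsum kweight
  rw [← Finset.sum_add_distrib]
  apply Finset.sum_congr rfl
  intro i _
  have h0 : 0 ≤ lA L i := le_max_left _ _
  push_cast
  split_ifs <;> omega

theorem A_loop1 (L : List Int) (N : Nat) (hL : ∀ i, i < N → 0 ≤ L.getD i 0) :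
    ∀ K, K ≤ N →
    (((List.range K).map (fun i : Nat => (i : Int))).foldl
      (fun killed i =>
        let left := max 0 (i - PySem.List.pyGetD L i 0)
        let right := i - 1
        let killed := PySem.List.pySetD killed left (PySem.List.pyGetD killed left 0 + 1)
        PySem.List.pySetD killed (right + 1) (PySem.List.pyGetD killed (right + 1) 0 - 1))
      (List.replicate (N + 1) (0 : Int))).length = N + 1 ∧
    ∀ k : Nat, (((List.range K).map (fun i : Nat => (i : Int))).foldl
      (fun killed i =>
        let left := max 0 (i - PySem.List.pyGetD L i 0)
        let right := i - 1
        let killed := PySem.List.pySetD killed left (PySem.List.pyGetD killed left 0 + 1)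
        PySem.List.pySetD killed (right + 1) (PySem.List.pyGetD killed (right + 1) 0 - 1))
      (List.replicate (N + 1) (0 : Int))).getD k 0 = kweight L K k := by
  intro K
  induction K with
  | zero =>
    intro _
    constructor
    · simp
    · intro k; simp [kweight, List.getD_eq_getElem?_getD, List.getElem?_replicate]
      split <;> simp
  | succ K ih =>
    intro hK
    obtain ⟨hlen, hchar⟩ := ih (by omega)
    rw [List.range_succ, List.map_append, List.foldl_append]
    simp only [List.map_cons, List.map_nil, List.foldl_cons, List.foldl_nil]
    set killedK := ((List.range K).map (fun i : Nat => (i : Int))).foldl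
      (fun killed i =>
        let left := max 0 (i - PySem.List.pyGetD L i 0)
        let right := i - 1
        let killed := PySem.List.pySetD killed left (PySem.List.pyGetD killed left 0 + 1)
        PySem.List.pySetD killed (right + 1) (PySem.List.pyGetD killed (right + 1) 0 - 1))
      (List.replicate (N + 1) (0 : Int))
    have hLK : 0 ≤ L.getD K 0 := hL K (by omega)
    have hleft : max 0 ((K : Int) - PySem.List.pyGetD L (K : Int) 0) = lA L K := by
      simp [lA]
    have h0lA : 0 ≤ lA L K := le_max_left _ _
    have hlAK : lA L K ≤ (K : Int) := max_le (by positivity) (by omega)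
    set lt := (lA L K).toNat with hltdef
    have hlt_cast : ((lt : Nat) : Int) = lA L K := Int.toNat_of_nonneg h0lA
    have hltN : lt < N + 1 := by omega
    have hKN1 : K < N + 1 := by omega
    have hidx : ((K : Int) - 1 + 1) = ((K : Nat) : Int) := by ring
    rw [hleft, ← hlt_cast, hidx]
    simp only [PySem.List.pySetD_natCast, PySem.List.pyGetD_natCast]
    have hmidlen : (killedK.set lt (killedK.getD lt 0 + 1)).length = N + 1 := by
      simp [hlen]
    constructor
    · rw [List.length_set, hmidlen]
    · intro k
      rw [getD_set_eq _ _ _ _ _ (by rw [hmidlen]; omega)]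
      rw [getD_set_eq _ _ _ _ _ (by rw [hlen]; omega), getD_set_eq _ _ _ _ _ (by rw [hlen]; omega)]
      have hks : kweight L (K + 1) k
          = kweight L K k + ((if lA L K = (k : Int) then 1 else 0) - (if K = k then (1 : Int) else 0)) := by
        unfold kweight; rw [Finset.sum_range_succ]
      rw [hks, hchar k, hchar lt, hchar K]
      by_cases h1 : k = K
      · by_cases h3 : lt = K
        · have e : kweight L K lt = kweight L K K := by rw [h3]
          subst h1
          split_ifs <;> omega
        · subst h1
          split_ifs <;> omega
      · by_cases h2 : k = lt
        · have e : kweight L K k = kweight L K lt := by rw [h2]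
          split_ifs <;> omega
        · split_ifs <;> omega

theorem gsum_zero (L : List Int) (N : Nat) : gsum L N 0 = 0 := by
  unfold gsum
  apply Finset.sum_eq_zero
  intro i _
  have h0 : 0 ≤ lA L i := le_max_left _ _
  have h1 : (0 : Int) ≤ (i : Int) := by positivity
  rw [if_neg (by push_cast; omega), if_neg (by push_cast; omega)]
  ring

theorem A_loop2 (L : List Int) (N : Nat) (killed : List Int)
    (hk : ∀ k : Nat, killed.getD k 0 = kweight L N k) :
    ∀ K, K ≤ N →
    (((List.range K).map (fun i : Nat => (i : Int))).foldl
      (fun (sc : Int × Int) i =>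
        let current := sc.2 + PySem.List.pyGetD killed i 0
        (if current = 0 then sc.1 + 1 else sc.1, current))
      (0, 0)) = (countA L N K, gsum L N K) := by
  intro K
  induction K with
  | zero =>
    intro _
    simp [countA, gsum_zero]
  | succ K ih =>
    intro hK
    rw [List.range_succ, List.map_append, List.foldl_append]
    simp only [List.map_cons, List.map_nil, List.foldl_cons, List.foldl_nil]
    rw [ih (by omega)]
    simp only [PySem.List.pyGetD_natCast, hk K]
    rw [← gsum_succ, countA_succ]
    split <;> simp_all

theorem gsum_zero_iff (L : List Int) (N j : Nat) (hL : ∀ i, i < N → 0 ≤ L.getD i 0)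
    (_hj : j < N) : (gsum L N (j + 1) = 0) ↔ survB L N j = true := by
  unfold gsum
  have hterm : ∀ i ∈ Finset.range N,
      (0 : Int) ≤ ((if lA L i < ((j + 1 : Nat) : Int) then 1 else 0) - (if (i : Int) < ((j + 1 : Nat) : Int) then (1 : Int) else 0)) := by
    intro i hi
    rw [Finset.mem_range] at hi
    have h0 : 0 ≤ lA L i := le_max_left _ _
    have h1 : lA L i ≤ (i : Int) := max_le (by positivity) (by have := hL i hi; omega)
    push_cast
    split_ifs <;> omega
  rw [Finset.sum_eq_zero_iff_of_nonneg hterm]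
  simp only [survB, List.all_eq_true, List.mem_range, decide_eq_true_eq]
  apply forall_congr'
  intro i
  by_cases hi : i < N
  · simp only [Finset.mem_range, hi, forall_const]
    have h0 : 0 ≤ lA L i := le_max_left _ _
    have h1 : lA L i ≤ (i : Int) := max_le (by positivity) (by have := hL i hi; omega)
    have hge : fA L i ≤ lA L i := le_max_right _ _
    have h2 : lA L i = 0 ∨ lA L i = fA L i := by
      unfold lA fA
      rcases le_total ((i : Int) - L.getD i 0) 0 with h | h
      · left; exact max_eq_left h
      · right; exact max_eq_right h
    push_cast
    constructor
    · intro h hji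
      rcases h2 with h2 | h2 <;> (split_ifs at h <;> omega)
    · intro h
      by_cases hji : j < i
      · have := h hji
        split_ifs <;> omega
      · split_ifs <;> omega
  · simp only [Finset.mem_range, hi, false_implies]

theorem A_eq (n : Int) (L : List Int) (h : 0 ≤ n) (h1 : n ≤ (L.length : Int))
    (h2 : ∀ x ∈ L.take n.toNat, 0 ≤ x) :
    count_survivors n L = countA L n.toNat n.toNat := by
  have hL : ∀ i, i < n.toNat → 0 ≤ L.getD i 0 := by
    intro i hi
    have hilen : i < L.length := by omega
    have hmem : L[i] ∈ L.take n.toNat := by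
      have : i < (L.take n.toNat).length := by simp; omega
      have := List.getElem_mem this
      rwa [List.getElem_take] at this
    have := h2 _ hmem
    rwa [List.getD_eq_getElem L 0 hilen]
  have hpyr : PySem.List.pyRange 0 n 1 = (List.range n.toNat).map (fun i : Nat => (i : Int)) := by
    rw [PySem.List.pyRange_one]
    apply List.ext_getElem
    · simp
    · intro k hk1 hk2
      simp
  have hrepl : (n + 1).toNat = n.toNat + 1 := by omega
  simp only [count_survivors, hpyr, hrepl]
  obtain ⟨hlen, hchar⟩ := A_loop1 L n.toNat hL n.toNat (le_refl _)
  rw [A_loop2 L n.toNat _ hchar n.toNat (le_refl _)]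

theorem cnt_eq (L : List Int) (N : Nat) (hL : ∀ i, i < N → 0 ≤ L.getD i 0) :
    countA L N N = countSurv L N N := by
  unfold countA countSurv
  congr 1
  apply List.countP_congr
  intro j hj
  rw [List.mem_range] at hj
  have hiff := gsum_zero_iff L N j hL hj
  simpa using hiff

-- ===== VERDICT (by name: the statement is the Claim_ definition above) =====
theorem count_survivors_spec : Claim_equal_count_survivors := by
  intro n L _ hpre
  obtain ⟨h1, h2⟩ := hpre
  unfold Spec_count_survivors
  by_cases h : 0 ≤ n
  · rw [A_eq n L h h1 h2, B_eq n L h, cnt_eq L n.toNat (by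
      intro i hi
      have hilen : i < L.length := by omega
      have hmem : L[i] ∈ L.take n.toNat := by
        have hti : i < (L.take n.toNat).length := by simp; omega
        have := List.getElem_mem hti
        rwa [List.getElem_take] at this
      have := h2 _ hmem
      rwa [List.getD_eq_getElem L 0 hilen])]
  · -- n < 0: both loops are over empty ranges
    rw [Int.not_le] at h
    have ha : PySem.List.pyRange 0 n 1 = [] := PySem.List.pyRange_one_eq_nil (by omega)
    have hb : PySem.List.pyRange (n - 1) (-1) (-1) = [] := PySem.List.pyRange_neg_one_eq_nil (by omega)
    simp [count_survivors, count_survivors_alt, ha, hb]
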